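-- pv_equiv track=rewrite | github.com/yungshan629/Coursera-Data-Structures-and-Algorithms-Specialization | Algorithms_on_Strings/Module_3/suffix_array_long.py | compute_classes
-- ===== SOURCE A (Python) =====
-- def compute_classes(s, order):
--     cclass = [0] * len(s)
--     for i in range(1, len(s)):
--         cur, prev = order[i], order[i - 1]
--         if s[cur] != s[prev]:
--             cclass[cur] = cclass[prev] + 1
--         else:
--             cclass[cur] = cclass[prev]
--     return cclass
-- ===== SOURCE B (Python) =====
-- def compute_classes(s, order):
--     n = len(s)
--     cclass = [0] * n
--     # phase 1: split the first n order positions into maximal runs of equal characters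
--     runs = []
--     for o in order[:n]:
--         if runs and s[runs[-1][-1]] == s[o]:
--             runs[-1].append(o)
--         else:
--             runs.append([o])
--     # phase 2: the class of every position in a run is that run's index
--     for cls, run in enumerate(runs):
--         for o in run:
--             cclass[o] = cls
--     return cclass
-- ===== Notes on version B (the rewrite author's own statement) =====
-- stated objective: alternative
-- what changed: A's dependent counter pass (cclass[cur] = cclass[prev] + indicator, reading back the half-written array) is replaced by run-length grouping: B first partitions the order positions into maximal runs of equal characters (a list-of-lists data structure A never builds), then assigns each run's enumerate index to its members with a nested loop.
-- outside the precondition, e.g. on compute_classes('a', [1]): A returns [0], B raises IndexError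
import Mathlib
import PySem

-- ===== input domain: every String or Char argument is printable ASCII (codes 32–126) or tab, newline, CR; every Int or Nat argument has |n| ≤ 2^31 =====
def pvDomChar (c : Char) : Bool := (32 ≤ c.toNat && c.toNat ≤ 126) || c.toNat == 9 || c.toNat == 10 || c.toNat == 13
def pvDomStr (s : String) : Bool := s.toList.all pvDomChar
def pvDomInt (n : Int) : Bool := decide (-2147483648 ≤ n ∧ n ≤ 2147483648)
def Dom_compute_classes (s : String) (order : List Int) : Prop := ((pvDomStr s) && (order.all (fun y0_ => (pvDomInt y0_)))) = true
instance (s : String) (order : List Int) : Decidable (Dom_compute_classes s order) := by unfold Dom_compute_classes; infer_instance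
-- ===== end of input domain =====

-- B replaces A's dependent counter pass (cclass[cur] = cclass[prev] + indicator, read back
-- out of the half-written array) by run-length grouping: partition the order positions into
-- maximal runs of equal characters, then scatter each run's enumerate index to its members;
-- return values are proved equal on Pre_ (objective: alternative).


-- ===== PORT A =====
def compute_classes (s : String) (order : List Int) : List Int :=
  (PySem.List.pyRange 1 (PySem.Str.len s) 1).foldl
    (fun cclass i =>
      let cur := PySem.List.pyGetD order i 0
      let prev := PySem.List.pyGetD order (i - 1) 0
      if PySem.List.pyGetD s.toList cur 'a' ≠ PySem.List.pyGetD s.toList prev 'a' then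
        PySem.List.pySetD cclass cur (PySem.List.pyGetD cclass prev 0 + 1)
      else
        PySem.List.pySetD cclass cur (PySem.List.pyGetD cclass prev 0))
    (List.replicate s.toList.length (0 : Int))

-- ===== PORT B =====
-- one step of B's run-building loop: 'if runs and s[runs[-1][-1]] == s[o]: runs[-1].append(o) else: runs.append([o])'
def growRun (cs : List Char) (runs : List (List Int)) (o : Int) : List (List Int) :=
  match runs.getLast? with
  | some last =>
      if PySem.List.pyGetD cs (last.getLastD 0) 'a' = PySem.List.pyGetD cs o 'a' then
        runs.dropLast ++ [last ++ [o]]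
      else
        runs ++ [[o]]
  | none => runs ++ [[o]]

def compute_classes_alt (s : String) (order : List Int) : List Int :=
  let runs := (PySem.List.slice order none (some (PySem.Str.len s))).foldl (growRun s.toList) []
  (PySem.List.enumerate runs 0).foldl
    (fun cclass p => p.2.foldl (fun cc o => PySem.List.pySetD cc o p.1) cclass)
    (List.replicate s.toList.length (0 : Int))

-- ===== PRECONDITION & SPEC =====
-- Pre_ excludes inputs where A raises IndexError (order too short, or an order entry out of
-- range, for a string of length ≥ 2), and inputs with len(s) = 1 whose first order entry is
-- out of range: there A never touches order and returns [0] while B's scatter pass raises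
-- IndexError.
def Pre_compute_classes (s : String) (order : List Int) : Prop :=
  (2 ≤ s.toList.length → s.toList.length ≤ order.length) ∧
  ∀ j < min order.length s.toList.length, PySem.Raise.InRange s.toList.length (order.getD j 0)
instance (s : String) (order : List Int) : Decidable (Pre_compute_classes s order) := by
  unfold Pre_compute_classes; infer_instance

def pvWitness_compute_classes : String × List Int := ("aba", [2, 0, 1])

def Spec_compute_classes (s : String) (order : List Int) (out : List Int) : Prop := out = compute_classes_alt s order
instance (s : String) (order : List Int) (out : List Int) : Decidable (Spec_compute_classes s order out) := by unfold Spec_compute_classes; infer_instance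

-- ===== CLAIM (what is proved, stated in full; the proofs are below) =====
def Claim_equal_compute_classes : Prop := ∀ (s : String) (order : List Int), Dom_compute_classes s order → Pre_compute_classes s order → Spec_compute_classes s order (compute_classes s order)

-- ===== LEMMAS AND PROOFS =====

-- normalized (Python-wrapped) index into a list of length n
def nidx (n : Nat) (i : Int) : Nat := (if i < 0 then i + n else i).toNat

-- the 0/1 indicator both programs compare at step k
def dstep (cs : List Char) (order : List Int) (k : Nat) : Int :=
  if PySem.List.pyGetD cs (order.getD k 0) 'a' ≠ PySem.List.pyGetD cs (order.getD (k-1) 0) 'a'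
  then 1 else 0

-- the class (rank) of the k-th position of the sorted order
def rnk (cs : List Char) (order : List Int) : Nat → Int
  | 0 => 0
  | j+1 => rnk cs order j + dstep cs order (j+1)

-- result of scattering the first k (slot, rank) pairs into a zero array
def scat (cs : List Char) (order : List Int) (k : Nat) : List Int :=
  (List.range k).foldl
    (fun acc j => acc.set (nidx cs.length (order.getD j 0)) (rnk cs order j))
    (List.replicate cs.length (0 : Int))

-- the body of port A as a standalone fold
def afold (cs : List Char) (order : List Int) (b : Int) : List Int :=
  (PySem.List.pyRange 1 b 1).foldl
    (fun cclass i =>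
      if PySem.List.pyGetD cs (PySem.List.pyGetD order i 0) 'a' ≠ PySem.List.pyGetD cs (PySem.List.pyGetD order (i-1) 0) 'a' then
        PySem.List.pySetD cclass (PySem.List.pyGetD order i 0) (PySem.List.pyGetD cclass (PySem.List.pyGetD order (i-1) 0) 0 + 1)
      else
        PySem.List.pySetD cclass (PySem.List.pyGetD order i 0) (PySem.List.pyGetD cclass (PySem.List.pyGetD order (i-1) 0) 0))
    (List.replicate cs.length (0 : Int))

-- B's run list after consuming the first k order positions
def bruns (cs : List Char) (order : List Int) (k : Nat) : List (List Int) :=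
  ((order.take cs.length).take k).foldl (growRun cs) []

-- each run element paired with its run index
def flat (runs : List (List Int)) : List (Int × Int) :=
  (PySem.List.enumerate runs 0).flatMap (fun p => p.2.map (fun o => (o, p.1)))

theorem scat_succ (cs : List Char) (order : List Int) (k : Nat) :
    scat cs order (k+1) = (scat cs order k).set (nidx cs.length (order.getD k 0)) (rnk cs order k) := by
  simp [scat, List.range_succ]

theorem length_scat (cs : List Char) (order : List Int) (k : Nat) :
    (scat cs order k).length = cs.length := by
  induction k with
  | zero => simp [scat]
  | succ k ih => rw [scat_succ]; simpa using ih

theorem nidx_lt (n : Nat) (i : Int) (h : PySem.Raise.InRange n i) : nidx n i < n := by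
  simp [PySem.Raise.InRange] at h
  unfold nidx; split <;> omega

theorem getD_scat_succ (cs : List Char) (order : List Int) (k : Nat)
    (h : PySem.Raise.InRange cs.length (order.getD k 0)) :
    (scat cs order (k+1)).getD (nidx cs.length (order.getD k 0)) 0 = rnk cs order k := by
  rw [scat_succ, List.getD_eq_getElem _ _ (by rw [List.length_set, length_scat]; exact nidx_lt _ _ h)]
  rw [List.getElem_set_self]

theorem scat_one (cs : List Char) (order : List Int) :
    scat cs order 1 = List.replicate cs.length (0 : Int) := by
  rw [show (1:Nat) = 0+1 from rfl, scat_succ]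
  show (scat cs order 0).set _ (0:Int) = _
  simp [scat, List.set_replicate_self]

theorem pyGetD_eq_getD_nidx (xs : List Int) (i : Int) (d : Int) (h : PySem.Raise.InRange xs.length i) :
    PySem.List.pyGetD xs i d = xs.getD (nidx xs.length i) d := by
  simp [PySem.Raise.InRange] at h
  unfold nidx
  by_cases h0 : 0 ≤ i
  · rw [PySem.List.pyGetD_eq_getElem xs d h0 h.2, if_neg (by omega), List.getD_eq_getElem xs d (by omega)]
  · rw [if_pos (by omega)]
    have hk : i = -(((-i).toNat : Nat) : Int) := by omega
    rw [hk, PySem.List.pyGetD_neg_natCast xs (-i).toNat d (by omega) (by omega),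
        List.getD_eq_getElem xs d (by omega)]
    congr 1; omega

theorem pySetD_eq_set_nidx (xs : List Int) (i : Int) (v : Int) (h : PySem.Raise.InRange xs.length i) :
    PySem.List.pySetD xs i v = xs.set (nidx xs.length i) v := by
  simp [PySem.Raise.InRange] at h
  unfold nidx
  by_cases h0 : 0 ≤ i
  · rw [PySem.List.pySetD_of_nonneg xs v h0, if_neg (by omega)]
  · rw [if_pos (by omega)]
    simp only [PySem.List.pySetD, PySem.List.pySet?, PySem.List.pyIdx?, if_neg h0,
      if_pos (show -(xs.length:Int) ≤ i by omega)]
    simp only [Option.map_some, Option.getD_some]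
    congr 1; omega

theorem afold_eq_scat (cs : List Char) (order : List Int) (k : Nat) (h1 : 1 ≤ k)
    (hk : k ≤ cs.length)
    (hord : ∀ j < cs.length, PySem.Raise.InRange cs.length (order.getD j 0)) :
    afold cs order (k : Int) = scat cs order k := by
  induction k, h1 using Nat.le_induction with
  | base =>
    rw [scat_one]
    simp [afold, PySem.List.pyRange_one_eq_nil (le_refl (1:Int))]
  | succ k h1 ih =>
    have hcast : ((k + 1 : Nat) : Int) = (k : Int) + 1 := by push_cast; ring
    rw [afold, hcast, PySem.List.pyRange_one_succ_right (by omega), List.foldl_append]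
    rw [← afold, ih (by omega)]
    simp only [List.foldl_cons, List.foldl_nil]
    have hc1 : ((k : Int)) - 1 = ((k - 1 : Nat) : Int) := by omega
    have hordk := hord k (by omega)
    have hordk1 := hord (k-1) (by omega)
    rw [hc1]
    simp only [PySem.List.pyGetD_natCast]
    have hlen : (scat cs order k).length = cs.length := length_scat cs order k
    have hk1 : k - 1 + 1 = k := by omega
    have hget : PySem.List.pyGetD (scat cs order k) ((order.getD (k-1) 0)) 0 = rnk cs order (k-1) := by
      rw [pyGetD_eq_getD_nidx _ _ _ (by rw [hlen]; exact hordk1), hlen]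
      have h2 := getD_scat_succ cs order (k-1) hordk1
      rw [hk1] at h2
      exact h2
    have hset : ∀ v, PySem.List.pySetD (scat cs order k) (order.getD k 0) v
        = (scat cs order k).set (nidx cs.length (order.getD k 0)) v := by
      intro v
      rw [pySetD_eq_set_nidx _ _ _ (by rw [hlen]; exact hordk), hlen]
    have hrnk : rnk cs order k = rnk cs order (k-1) + dstep cs order k := by
      have h3 : rnk cs order (k-1+1) = rnk cs order (k-1) + dstep cs order (k-1+1) := rfl
      rw [hk1] at h3
      exact h3
    rw [scat_succ]
    split_ifs with hcond
    · rw [hset, hget, hrnk, dstep, if_pos hcond]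
    · rw [hset, hget, hrnk, dstep, if_neg hcond]; ring_nf

theorem scatter_eq_scat (cs : List Char) (order : List Int) (k : Nat) (hk : k ≤ cs.length)
    (hord : ∀ j < cs.length, PySem.Raise.InRange cs.length (order.getD j 0)) :
    ((List.range k).map (fun j => (order.getD j 0, rnk cs order j))).foldl
        (fun acc p => PySem.List.pySetD acc p.1 p.2) (List.replicate cs.length (0 : Int))
      = scat cs order k := by
  induction k with
  | zero => rfl
  | succ k ih =>
    rw [List.range_succ, List.map_append, List.foldl_append, ih (by omega)]
    simp only [List.map_cons, List.map_nil, List.foldl_cons, List.foldl_nil]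
    rw [pySetD_eq_set_nidx _ _ _ (by rw [length_scat]; exact hord k (by omega)), length_scat, scat_succ]

theorem foldl_flatMap' {α β γ : Type} (l : List α) (f : α → List β) (g : γ → β → γ) (init : γ) :
    (l.flatMap f).foldl g init = l.foldl (fun a x => (f x).foldl g a) init := by
  induction l generalizing init with
  | nil => rfl
  | cons x xs ih => simp [List.flatMap_cons, List.foldl_append, ih]

-- B's nested scatter loop equals a single fold over the flattened (slot, class) pairs
theorem scatter_nested (runs : List (List Int)) (init : List Int) :
    (PySem.List.enumerate runs 0).foldl
        (fun cclass p => p.2.foldl (fun cc o => PySem.List.pySetD cc o p.1) cclass) init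
      = (flat runs).foldl (fun cc q => PySem.List.pySetD cc q.1 q.2) init := by
  unfold flat
  rw [foldl_flatMap']
  congr 1
  funext a p
  rw [List.foldl_map]

theorem flat_append_singleton (X : List (List Int)) (r : List Int) :
    flat (X ++ [r]) = flat X ++ r.map (fun o => (o, (X.length : Int))) := by
  unfold flat
  rw [PySem.List.enumerate_append, List.flatMap_append]
  simp [PySem.List.enumerate_cons, PySem.List.enumerate_nil]

theorem bruns_succ (cs : List Char) (order : List Int) (k : Nat)
    (hk : k < cs.length) (hlen : cs.length ≤ order.length) :
    bruns cs order (k+1) = growRun cs (bruns cs order k) (order.getD k 0) := by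
  unfold bruns
  have hkt : k < (order.take cs.length).length := by
    rw [List.length_take]; omega
  rw [List.take_add_one, List.getElem?_eq_getElem hkt]
  simp only [Option.toList_some, List.foldl_append, List.foldl_cons, List.foldl_nil]
  congr 1
  rw [List.getElem_take, List.getD_eq_getElem order 0 (by omega)]

-- the invariant of B's run-building loop
theorem bruns_inv (cs : List Char) (order : List Int) (hlen : cs.length ≤ order.length)
    (k : Nat) (h1 : 1 ≤ k) (hk : k ≤ cs.length) :
    ∃ R₀ last, bruns cs order k = R₀ ++ [last] ∧
      last.getLastD 0 = order.getD (k-1) 0 ∧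
      flat (bruns cs order k) = (List.range k).map (fun j => (order.getD j 0, rnk cs order j)) ∧
      ((bruns cs order k).length : Int) = rnk cs order (k-1) + 1 := by
  induction k, h1 using Nat.le_induction with
  | base =>
    have h0 : bruns cs order 1 = [[order.getD 0 0]] := by
      rw [show (1:Nat) = 0+1 from rfl, bruns_succ cs order 0 (by omega) hlen]
      rfl
    refine ⟨[], [order.getD 0 0], by simpa using h0, by simp, ?_, by simp [h0, rnk]⟩
    rw [h0]
    simp [flat, PySem.List.enumerate_cons, PySem.List.enumerate_nil, rnk]
  | succ k h1 ih =>
    obtain ⟨R₀, last, hR, hlast, hflat, hlength⟩ := ih (by omega)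
    have hrec := bruns_succ cs order k (by omega) hlen
    have hgl : (bruns cs order k).getLast? = some last := by rw [hR, List.getLast?_concat]
    have hk1 : k - 1 + 1 = k := by omega
    have hrnk : rnk cs order k = rnk cs order (k-1) + dstep cs order k := by
      have h3 : rnk cs order (k-1+1) = rnk cs order (k-1) + dstep cs order (k-1+1) := rfl
      rw [hk1] at h3; exact h3
    have hR₀len : (R₀.length : Int) = rnk cs order (k-1) := by
      rw [hR] at hlength; simp at hlength; omega
    rw [hrec]
    unfold growRun
    rw [hgl]
    simp only [hlast]
    by_cases hcond : PySem.List.pyGetD cs (order.getD (k-1) 0) 'a' = PySem.List.pyGetD cs (order.getD k 0) 'a'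
    · rw [if_pos hcond, hR, List.dropLast_concat]
      have hd0 : dstep cs order k = 0 := by
        unfold dstep; rw [if_neg]; intro hne; exact hne hcond.symm
      have hcls : ((R₀.length : Nat) : Int) = rnk cs order k := by
        rw [hR₀len, hrnk, hd0, add_zero]
      refine ⟨R₀, last ++ [order.getD k 0], rfl, by simp, ?_, ?_⟩
      · rw [flat_append_singleton, List.map_append, ← List.append_assoc, ← flat_append_singleton,
            ← hR, hflat, List.range_succ, List.map_append]
        simp only [List.map_cons, List.map_nil, hcls]
      · simp only [List.length_append, List.length_cons, List.length_nil, Nat.add_sub_cancel,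
          Nat.zero_add]
        push_cast
        rw [hrnk, hd0]
        linarith [hR₀len]
    · rw [if_neg hcond]
      have hd1 : dstep cs order k = 1 := by
        unfold dstep; rw [if_pos]; intro heq; exact hcond heq.symm
      have hcls : ((bruns cs order k).length : Int) = rnk cs order k := by
        rw [hlength, hrnk, hd1]
      refine ⟨bruns cs order k, [order.getD k 0], rfl, by simp, ?_, ?_⟩
      · rw [flat_append_singleton, hflat, List.range_succ, List.map_append]
        simp only [List.map_cons, List.map_nil, hcls]
      · simp only [List.length_append, List.length_cons, List.length_nil, Nat.add_sub_cancel,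
          Nat.zero_add]
        push_cast
        rw [hrnk, hd1]
        linarith [hlength]

theorem compute_classes_eq_afold (s : String) (order : List Int) :
    compute_classes s order = afold s.toList order ((s.toList.length : Int)) := by
  have h : compute_classes s order = afold s.toList order (PySem.Str.len s) := rfl
  rw [h, PySem.Str.len_eq]

theorem alt_eq (s : String) (order : List Int) :
    compute_classes_alt s order
      = (PySem.List.enumerate ((order.take s.toList.length).foldl (growRun s.toList) []) 0).foldl
          (fun cclass p => p.2.foldl (fun cc o => PySem.List.pySetD cc o p.1) cclass)
          (List.replicate s.toList.length (0 : Int)) := by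
  have h : compute_classes_alt s order
      = (PySem.List.enumerate ((PySem.List.slice order none (some (PySem.Str.len s))).foldl (growRun s.toList) []) 0).foldl
          (fun cclass p => p.2.foldl (fun cc o => PySem.List.pySetD cc o p.1) cclass)
          (List.replicate s.toList.length (0 : Int)) := rfl
  rw [h, PySem.Str.len_eq, PySem.List.slice_to_natCast]

theorem take_foldl_eq_bruns (cs : List Char) (order : List Int) :
    (order.take cs.length).foldl (growRun cs) [] = bruns cs order cs.length := by
  unfold bruns
  rw [List.take_take, min_self]

theorem main_eq (s : String) (order : List Int)
    (h2 : 2 ≤ s.toList.length → s.toList.length ≤ order.length)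
    (hord : ∀ j < min order.length s.toList.length,
      PySem.Raise.InRange s.toList.length (order.getD j 0)) :
    compute_classes s order = compute_classes_alt s order := by
  rw [compute_classes_eq_afold, alt_eq, take_foldl_eq_bruns, scatter_nested]
  rcases Nat.lt_or_ge s.toList.length 2 with hn | hn
  · interval_cases h : s.toList.length
    · -- length 0
      rw [show ((0:Nat):Int) = 0 from rfl]
      simp [afold, bruns, flat, PySem.List.pyRange_one_eq_nil (show (0:Int) ≤ 1 by omega),
        PySem.List.enumerate_nil, h]
    · -- length 1
      rw [show ((1:Nat):Int) = 1 from rfl]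
      simp only [afold, PySem.List.pyRange_one_eq_nil (le_refl (1:Int)), List.foldl_nil, h]
      cases order with
      | nil => simp [bruns, flat, PySem.List.enumerate_nil]
      | cons o rest =>
        have hbr : bruns s.toList (o :: rest) 1 = [[o]] := by
          rw [show (1:Nat) = 0+1 from rfl, bruns_succ s.toList (o :: rest) 0 (by omega) (by rw [h, List.length_cons]; omega)]
          rfl
        rw [hbr]
        simp only [flat, PySem.List.enumerate_cons, PySem.List.enumerate_nil,
          List.flatMap_cons, List.flatMap_nil, List.map_cons, List.map_nil, List.append_nil,
          List.foldl_cons, List.foldl_nil, List.replicate]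
        have hio : PySem.Raise.InRange 1 o := by
          have := hord 0 (by simp)
          simpa [h] using this
        rw [show PySem.List.pySetD [(0:Int)] o 0 = ([(0:Int)].set (nidx 1 o) 0) from
          (by simpa using pySetD_eq_set_nidx [(0:Int)] o 0 (by simpa using hio))]
        have := nidx_lt 1 o hio
        interval_cases hh : (nidx 1 o)
        simp
  · have hlen : s.toList.length ≤ order.length := h2 hn
    have hord' : ∀ j < s.toList.length, PySem.Raise.InRange s.toList.length (order.getD j 0) := by
      intro j hj; exact hord j (by omega)
    obtain ⟨_, _, _, _, hflat, _⟩ := bruns_inv s.toList order hlen s.toList.length (by omega) le_rfl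
    rw [afold_eq_scat s.toList order s.toList.length (by omega) (le_refl _) hord']
    rw [hflat, scatter_eq_scat s.toList order s.toList.length (le_refl _) hord']

-- ===== VERDICT (by name: the statement is the Claim_ definition above) =====
theorem compute_classes_spec : Claim_equal_compute_classes := by
  intro s order _ hpre
  show compute_classes s order = compute_classes_alt s order
  exact main_eq s order hpre.1 hpre.2
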